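-- pv_equiv track=rewrite | github.com/xy990/MachineLearningProj | finalfeature.py | apply_phraser
-- ===== SOURCE A (Python) =====
-- def apply_phraser(words, gram2id, max_phrase_length=4):
--     """"apply phraser method to sentence."
--          Input should be list of lower-case (stemmed) words"""
--     sentlength = len(words)
--     skip = 0
--     new_s = []
--     for i in range(sentlength):
--         if skip > 0:
--             skip -= 1
--             continue
--         if words[i] is None:
--             continue
--         for n in reversed(range(1,max_phrase_length+1)):
--             if i+n > sentlength:
--                 continue
--             gram = words[i:i+n]
--             if None in gram:
--                 continue
--             gram_word = '_'.join(gram)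
--             if gram_word in gram2id:
--                 new_s.append(gram2id[gram_word])
--                 skip = n-1
--                 break
--     return new_s
-- ===== SOURCE B (Python) =====
-- def apply_phraser(words, gram2id, max_phrase_length=4):
--     """Two-stage re-implementation: split the sentence into maximal None-free
--     segments first, then greedily match each segment, building the candidate
--     phrase joins incrementally (last hit of the ascending scan = longest match)."""
--     # pass 1: segmentation on None
--     segs = []
--     cur = []
--     for w in words:
--         if w is None:
--             if cur:
--                 segs.append(cur)
--                 cur = []
--         else:
--             cur.append(w)
--     if cur:
--         segs.append(cur)
--     # pass 2: greedy longest match inside each segment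
--     out = []
--     for seg in segs:
--         L = len(seg)
--         i = 0
--         while i < L:
--             limit = min(max_phrase_length, L - i)
--             acc = ''
--             best = None  # (length, id) of the longest hit so far
--             for k in range(1, limit + 1):
--                 acc = seg[i] if k == 1 else acc + '_' + seg[i + k - 1]
--                 if acc in gram2id:
--                     best = (k, gram2id[acc])
--             if best is not None:
--                 out.append(best[1])
--                 i += best[0]
--             else:
--                 i += 1
--     return out
-- ===== Notes on version B (the rewrite author's own statement) =====
-- stated objective: faster
-- what changed: B is a two-stage algorithm: it first splits the sentence into maximal None-free segments, then greedily matches inside each segment, capping the candidate length at the remaining segment length and building the candidate phrase strings incrementally (one join per prefix, ascending with last-hit-wins) instead of A's single indexed loop with a skip counter that scans all max_phrase_length lengths per position with per-length slicing + re-joining and in-loop None checks.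
import Mathlib
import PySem

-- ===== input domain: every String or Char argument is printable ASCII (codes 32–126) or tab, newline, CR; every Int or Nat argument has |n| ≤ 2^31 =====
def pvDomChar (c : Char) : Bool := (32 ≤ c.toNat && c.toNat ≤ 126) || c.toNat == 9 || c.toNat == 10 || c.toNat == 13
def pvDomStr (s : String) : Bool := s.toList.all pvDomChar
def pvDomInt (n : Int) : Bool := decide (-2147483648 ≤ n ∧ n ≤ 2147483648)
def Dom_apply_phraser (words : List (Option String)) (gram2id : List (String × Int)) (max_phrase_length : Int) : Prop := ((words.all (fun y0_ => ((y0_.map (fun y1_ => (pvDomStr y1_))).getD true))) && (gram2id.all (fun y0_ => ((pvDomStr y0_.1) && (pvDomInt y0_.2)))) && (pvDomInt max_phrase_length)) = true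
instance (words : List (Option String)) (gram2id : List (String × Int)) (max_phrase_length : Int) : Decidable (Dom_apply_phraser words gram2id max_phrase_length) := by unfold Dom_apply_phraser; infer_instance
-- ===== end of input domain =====

-- B re-implements A in two stages: it first splits the sentence into maximal
-- None-free segments, then greedily matches each segment, capping candidate
-- lengths at the remaining segment and building candidate joins incrementally
-- (last hit of the ascending scan = longest match); measured faster than A,
-- whose inner loop scans all max_phrase_length lengths with slicing+joining.

-- ===== PORT A =====
-- inner 'for n in reversed(range(1, max_phrase_length+1))' with break:
-- returns some (appended id, new skip) on break-with-append, none if the loop finishes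
def pvAInner (words : List (Option String)) (gram2id : List (String × Int))
    (sentlength i : Int) : List Int → Option (Int × Int)
  | [] => none
  | n :: rest =>
    if i + n > sentlength then pvAInner words gram2id sentlength i rest
    else
      let gram := PySem.List.slice words (some i) (some (i + n))
      if gram.contains none then pvAInner words gram2id sentlength i rest
      else
        -- '_'.join(gram): gram holds no None here, so getD "" never fires
        let gram_word := PySem.Str.join "_" (gram.map (fun o => o.getD ""))
        match (PySem.Dict.mk gram2id).get? gram_word with
        | some v => some (v, n - 1)
        | none => pvAInner words gram2id sentlength i rest

-- one iteration of A's outer for-loop; state = (skip, new_s)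
def pvABody (words : List (Option String)) (gram2id : List (String × Int))
    (max_phrase_length : Int) (st : Int × List Int) (i : Int) : Int × List Int :=
  if st.1 > 0 then (st.1 - 1, st.2)
  else if (PySem.List.pyGet? words i).getD none = none then st   -- i is always in range in the loop
  else
    match pvAInner words gram2id (words.length : Int) i
        ((PySem.List.pyRange 1 (max_phrase_length + 1) 1).reverse) with
    | some (v, sk) => (sk, st.2 ++ [v])
    | none => st

def apply_phraser (words : List (Option String)) (gram2id : List (String × Int)) (max_phrase_length : Int) : List Int :=
  ((PySem.List.pyRange 0 (words.length : Int) 1).foldl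
      (pvABody words gram2id max_phrase_length) (0, [])).2

-- ===== PORT B =====
-- pass 1: one segmentation step of B's 'for w in words' loop; state = (segs, cur)
def pvSegStep (st : List (List String) × List String) (w : Option String) :
    List (List String) × List String :=
  match w with
  | none => if st.2 = [] then st else (st.1 ++ [st.2], [])
  | some s => (st.1, st.2 ++ [s])

def pvSegs (words : List (Option String)) : List (List String) :=
  let st := words.foldl pvSegStep ([], [])
  if st.2 = [] then st.1 else st.1 ++ [st.2]

-- one step of B's inner 'for k in range(1, limit+1)'; state = (acc, best);
-- best = some (k, id) mirrors Python's best = (k, gram2id[acc]) / None;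
-- indices i and i+k-1 are always in range in the loop, so the getD "" never fires
def pvBStep (seg : List String) (gram2id : List (String × Int)) (i : Int)
    (st : String × Option (Int × Int)) (k : Int) : String × Option (Int × Int) :=
  let acc := if k = 1 then PySem.List.pyGetD seg i ""
             else st.1 ++ "_" ++ PySem.List.pyGetD seg (i + k - 1) ""
  match (PySem.Dict.mk gram2id).get? acc with
  | some v => (acc, some (k, v))
  | none => (acc, st.2)

-- the best slot of the fold only ever holds a k taken from range(1, limit+1), so 1 ≤ k
theorem pvBStep_fold_pos (seg : List String) (gram2id : List (String × Int)) (i : Int) :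
    ∀ (l : List Int) (st : String × Option (Int × Int)),
    (∀ k ∈ l, 1 ≤ k) → (∀ k v, st.2 = some (k, v) → 1 ≤ k) →
    ∀ k v, (l.foldl (pvBStep seg gram2id i) st).2 = some (k, v) → 1 ≤ k := by
  intro l
  induction l with
  | nil => intro st _ hst k v h; exact hst k v h
  | cons x t ih =>
    intro st hl hst k v h
    refine ih _ (fun k hk => hl k (by simp [hk])) ?_ k v h
    intro k' v' hst'
    simp only [pvBStep] at hst'
    split at hst'
    · simp at hst'; have := hl x (by simp); omega
    · exact hst k' v' hst'

-- pass 2: B's 'while i < L' loop over one segment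
def pvBSeg (gram2id : List (String × Int)) (mpl : Int) (seg : List String) (i : Nat) : List Int :=
  if _h : i < seg.length then
    match hm : ((PySem.List.pyRange 1 (min mpl ((seg.length : Int) - (i : Int)) + 1) 1).foldl
        (pvBStep seg gram2id (i : Int)) ("", none)).2 with
    | some kv => kv.2 :: pvBSeg gram2id mpl seg (i + kv.1.toNat)
    | none => pvBSeg gram2id mpl seg (i + 1)
  else []
termination_by seg.length - i
decreasing_by
  · have h1 : 1 ≤ kv.1 := by
      refine pvBStep_fold_pos seg gram2id (i : Int)
        (PySem.List.pyRange 1 (min mpl ((seg.length : Int) - (i : Int)) + 1) 1)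
        ("", none) ?_ ?_ kv.1 kv.2 (by simpa using hm)
      · intro k hk
        have := (PySem.List.mem_pyRange_one).mp hk
        omega
      · intro k v h; simp at h
    omega
  · omega

def apply_phraser_alt (words : List (Option String)) (gram2id : List (String × Int)) (max_phrase_length : Int) : List Int :=
  (pvSegs words).foldl (fun out seg => out ++ pvBSeg gram2id max_phrase_length seg 0) []

-- ===== PRECONDITION & SPEC =====
def Spec_apply_phraser (words : List (Option String)) (gram2id : List (String × Int)) (max_phrase_length : Int) (out : List Int) : Prop := out = apply_phraser_alt words gram2id max_phrase_length
instance (words : List (Option String)) (gram2id : List (String × Int)) (max_phrase_length : Int) (out : List Int) : Decidable (Spec_apply_phraser words gram2id max_phrase_length out) := by unfold Spec_apply_phraser; infer_instance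

-- ===== CLAIM (what is proved, stated in full; the proofs are below) =====
def Claim_equal_apply_phraser : Prop := ∀ (words : List (Option String)) (gram2id : List (String × Int)) (max_phrase_length : Int), Dom_apply_phraser words gram2id max_phrase_length → Spec_apply_phraser words gram2id max_phrase_length (apply_phraser words gram2id max_phrase_length)

-- ===== LEMMAS AND PROOFS =====

-- ---- proof-side intermediate: A as an index-advancing recursion (pvBGo) ----
def pvBTry (words : List (Option String)) (gram2id : List (String × Int))
    (i : Int) : Nat → Option (Int × Nat)
  | 0 => none
  | m + 1 =>
    let n : Int := (m : Int) + 1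
    let gram := PySem.List.slice words (some i) (some (i + n))
    if gram.contains none then pvBTry words gram2id i m
    else
      let gram_word := PySem.Str.join "_" (gram.map (fun o => o.getD ""))
      match (PySem.Dict.mk gram2id).get? gram_word with
      | some v => some (v, m + 1)
      | none => pvBTry words gram2id i m

theorem pvBTry_bounds {words : List (Option String)} {gram2id : List (String × Int)}
    {i : Int} : ∀ {f : Nat} {v : Int} {n : Nat},
    pvBTry words gram2id i f = some (v, n) → 1 ≤ n ∧ n ≤ f := by
  intro f
  induction f with
  | zero => intro v n h; simp [pvBTry] at h
  | succ m ih =>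
    intro v n h
    simp only [pvBTry] at h
    split at h
    · have := ih h; omega
    · split at h
      · simp at h; omega
      · have := ih h; omega

def pvBGo (words : List (Option String)) (gram2id : List (String × Int))
    (max_phrase_length : Int) (i : Nat) : List Int :=
  if h : i < words.length then
    if words[i] = none then pvBGo words gram2id max_phrase_length (i + 1)
    else
      match hm : pvBTry words gram2id (i : Int)
          (min max_phrase_length ((words.length : Int) - (i : Int))).toNat with
      | some (v, n) => v :: pvBGo words gram2id max_phrase_length (i + n)
      | none => pvBGo words gram2id max_phrase_length (i + 1)
  else []
termination_by words.length - i
decreasing_by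
  · omega
  · have := pvBTry_bounds hm; omega
  · omega

-- [m, m-1, ..., 1] : the values A's inner loop iterates over
def pvDesc : Nat → List Int
  | 0 => []
  | m + 1 => ((m : Int) + 1) :: pvDesc m

theorem pvDesc_eq (m : Nat) : pvDesc m = (List.range m).map (fun k : Nat => (m : Int) - (k : Int)) := by
  induction m with
  | zero => simp [pvDesc]
  | succ n ih =>
    rw [List.range_succ_eq_map]
    simp only [pvDesc, ih, List.map_cons, List.map_map]
    refine congrArg₂ _ (by push_cast; ring) ?_
    apply List.map_congr_left
    intro k _
    simp only [Function.comp]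
    push_cast; ring

theorem pvDesc_eq_reverse (mpl : Int) :
    (PySem.List.pyRange 1 (mpl + 1) 1).reverse = pvDesc mpl.toNat := by
  have h1 := PySem.List.pyRange_neg_one_eq_reverse mpl 0
  simp only [show (0:Int)+1 = 1 by ring] at h1
  rw [← h1, PySem.List.pyRange_neg_one, pvDesc_eq]
  by_cases h : 0 ≤ mpl
  · rw [show (mpl - 0).toNat = mpl.toNat by omega]
    apply List.map_congr_left; intro k _; omega
  · have h0 : mpl.toNat = 0 := by omega
    simp [h0]

theorem pvInner_eq (words : List (Option String)) (gram2id : List (String × Int))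
    (i : Int) (hle : i ≤ (words.length : Int)) :
    ∀ m : Nat, pvAInner words gram2id (words.length : Int) i (pvDesc m)
      = (pvBTry words gram2id i (min (m : Int) ((words.length : Int) - i)).toNat).map
          (fun p => (p.1, (p.2 : Int) - 1)) := by
  intro m
  induction m with
  | zero =>
    have h0 : (min ((0 : Nat) : Int) ((words.length : Int) - i)).toNat = 0 := by
      omega
    simp only [pvDesc, pvAInner, h0, pvBTry, Option.map_none]
  | succ m ih =>
    by_cases hgt : i + ((m : Int) + 1) > (words.length : Int)
    · have hmin : (min (((m + 1 : Nat)) : Int) ((words.length : Int) - i)).toNat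
          = (min ((m : Nat) : Int) ((words.length : Int) - i)).toNat := by omega
      simp only [pvDesc, pvAInner]
      rw [if_pos hgt, ih, hmin]
    · push Not at hgt
      have hmin : (min (((m + 1 : Nat)) : Int) ((words.length : Int) - i)).toNat = m + 1 := by
        push_cast; omega
      have hmin2 : (min ((m : Nat) : Int) ((words.length : Int) - i)).toNat = m := by
        omega
      simp only [pvDesc, pvAInner, hmin, pvBTry]
      rw [if_neg (by omega)]
      split_ifs with hc
      · rw [ih, hmin2]
      · cases hq : (PySem.Dict.mk gram2id).get?
            (PySem.Str.join "_" ((PySem.List.slice words (some i) (some (i + ((m : Int) + 1)))).map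
              (fun o => o.getD ""))) with
        | some v => rfl
        | none => rw [ih, hmin2]

theorem pvSkip_eq (words : List (Option String)) (gram2id : List (String × Int))
    (mpl : Int) : ∀ (s : Nat) (i : Int) (acc : List Int),
    ((PySem.List.pyRange i (words.length : Int) 1).foldl (pvABody words gram2id mpl)
        ((s : Int), acc)).2
    = ((PySem.List.pyRange (i + (s : Int)) (words.length : Int) 1).foldl
        (pvABody words gram2id mpl) (0, acc)).2 := by
  intro s
  induction s with
  | zero => intro i acc; simp
  | succ s ih =>
    intro i acc
    by_cases hib : i < (words.length : Int)
    · rw [PySem.List.pyRange_one_cons hib]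
      simp only [List.foldl_cons]
      have hbody : pvABody words gram2id mpl (((s + 1 : Nat) : Int), acc) i
          = (((s : Nat) : Int), acc) := by
        simp only [pvABody]
        rw [if_pos (by push_cast; omega)]
        push_cast; ring_nf
      rw [hbody, ih (i + 1) acc]
      have : i + 1 + (s : Int) = i + ((s + 1 : Nat) : Int) := by push_cast; ring
      rw [this]
    · rw [PySem.List.pyRange_one_eq_nil (by omega),
        PySem.List.pyRange_one_eq_nil (by push_cast; omega)]
      rfl

theorem pvMain (words : List (Option String)) (gram2id : List (String × Int))
    (mpl : Int) : ∀ (k i : Nat) (acc : List Int), words.length - i ≤ k →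
    ((PySem.List.pyRange (i : Int) (words.length : Int) 1).foldl
        (pvABody words gram2id mpl) (0, acc)).2
    = acc ++ pvBGo words gram2id mpl i := by
  intro k
  induction k with
  | zero =>
    intro i acc hk
    rw [PySem.List.pyRange_one_eq_nil (by omega), pvBGo, dif_neg (by omega)]
    simp
  | succ k ih =>
    intro i acc hk
    have hcast : ((i : Nat) : Int) + 1 = ((i + 1 : Nat) : Int) := by push_cast; ring
    by_cases hlt : i < words.length
    · rw [PySem.List.pyRange_one_cons (by omega)]
      simp only [List.foldl_cons]
      have hget : (PySem.List.pyGet? words (i : Int)).getD none = words[i] := by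
        rw [PySem.List.pyGet?_natCast]
        simp [List.getElem?_eq_getElem hlt]
      by_cases hw : words[i] = none
      · have hB : pvBGo words gram2id mpl i = pvBGo words gram2id mpl (i + 1) := by
          rw [pvBGo, dif_pos hlt, if_pos hw]
        have hbody : pvABody words gram2id mpl (0, acc) (i : Int) = (0, acc) := by
          simp only [pvABody]
          rw [if_neg (by omega), if_pos (by rw [hget]; exact hw)]
        rw [hbody, hcast, ih (i + 1) acc (by omega), hB]
      · have hminToNat : (min ((mpl.toNat : Nat) : Int) ((words.length : Int) - (i : Int))).toNat
            = (min mpl ((words.length : Int) - (i : Int))).toNat := by omega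
        have hinner := pvInner_eq words gram2id (i : Int) (by omega) mpl.toNat
        rw [hminToNat] at hinner
        cases hb : pvBTry words gram2id (i : Int)
            (min mpl ((words.length : Int) - (i : Int))).toNat with
        | none =>
          have hB : pvBGo words gram2id mpl i = pvBGo words gram2id mpl (i + 1) := by
            rw [pvBGo, dif_pos hlt, if_neg hw]
            split
            · rename_i v' n' hm
              rw [hb] at hm
              exact absurd hm (by simp)
            · rfl
          have hbody : pvABody words gram2id mpl (0, acc) (i : Int) = (0, acc) := by
            simp only [pvABody]
            rw [if_neg (by omega), if_neg (by rw [hget]; exact hw),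
              pvDesc_eq_reverse, hinner, hb]
            rfl
          rw [hbody, hcast, ih (i + 1) acc (by omega), hB]
        | some vn =>
          obtain ⟨v, n⟩ := vn
          have hn := pvBTry_bounds hb
          have hB : pvBGo words gram2id mpl i = v :: pvBGo words gram2id mpl (i + n) := by
            rw [pvBGo, dif_pos hlt, if_neg hw]
            split
            · rename_i v' n' hm
              rw [hb] at hm
              obtain ⟨rfl, rfl⟩ : v = v' ∧ n = n' := by simpa using hm
              rfl
            · rename_i hm
              rw [hb] at hm
              exact absurd hm (by simp)
          have hbody : pvABody words gram2id mpl (0, acc) (i : Int)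
              = ((n : Int) - 1, acc ++ [v]) := by
            simp only [pvABody]
            rw [if_neg (by omega), if_neg (by rw [hget]; exact hw),
              pvDesc_eq_reverse, hinner, hb]
            rfl
          rw [hbody]
          have hc1 : (n : Int) - 1 = ((n - 1 : Nat) : Int) := by omega
          rw [hc1, pvSkip_eq words gram2id mpl (n - 1) ((i : Int) + 1) (acc ++ [v])]
          have hfuel : n ≤ words.length - i := by
            have : ((min mpl ((words.length : Int) - (i : Int))).toNat : Int)
                ≤ (words.length : Int) - (i : Int) := by omega
            omega
          have hc2 : (i : Int) + 1 + ((n - 1 : Nat) : Int) = ((i + n : Nat) : Int) := by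
            push_cast; omega
          rw [hc2, ih (i + n) (acc ++ [v]) (by omega), hB]
          simp
    · rw [PySem.List.pyRange_one_eq_nil (by omega), pvBGo, dif_neg (by omega)]
      simp


-- ---- segmentation characterised recursively ----
def pvSegsFrom : List String → List (Option String) → List (List String)
  | cur, [] => if cur = [] then [] else [cur]
  | cur, none :: t => (if cur = [] then [] else [cur]) ++ pvSegsFrom [] t
  | cur, some w :: t => pvSegsFrom (cur ++ [w]) t

theorem pvSegs_foldl : ∀ (ws : List (Option String)) (segs : List (List String)) (cur : List String),
    (if (ws.foldl pvSegStep (segs, cur)).2 = [] then (ws.foldl pvSegStep (segs, cur)).1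
     else (ws.foldl pvSegStep (segs, cur)).1 ++ [(ws.foldl pvSegStep (segs, cur)).2])
    = segs ++ pvSegsFrom cur ws := by
  intro ws
  induction ws with
  | nil => intro segs cur; simp only [List.foldl_nil, pvSegsFrom]; split <;> simp
  | cons w t ih =>
    intro segs cur
    cases w with
    | none =>
      simp only [List.foldl_cons, pvSegStep, pvSegsFrom]
      by_cases hc : cur = []
      · rw [if_pos hc, ih segs cur, hc]; simp
      · rw [if_neg hc, ih (segs ++ [cur]) []]
        simp [hc]
    | some x =>
      simp only [List.foldl_cons, pvSegStep, pvSegsFrom]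
      exact ih segs (cur ++ [x])

theorem pvSegs_eq (words : List (Option String)) : pvSegs words = pvSegsFrom [] words := by
  have := pvSegs_foldl words [] []
  simpa [pvSegs] using this

theorem pvSegsFrom_run : ∀ (s cur : List String) (rest : List (Option String)),
    pvSegsFrom cur (s.map some ++ rest) = pvSegsFrom (cur ++ s) rest := by
  intro s
  induction s with
  | nil => intro cur rest; simp
  | cons x t ih =>
    intro cur rest
    simp only [List.map_cons, List.cons_append, pvSegsFrom]
    rw [ih (cur ++ [x]) rest]
    simp

-- ---- joins ----
theorem pvCharsJoin_snoc (sep : List Char) : ∀ (p : List Char) (l : List (List Char)) (x : List Char),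
    PySem.Chars.join sep ((p :: l) ++ [x]) = PySem.Chars.join sep (p :: l) ++ sep ++ x := by
  intro p l
  induction l generalizing p with
  | nil =>
    intro x
    rw [show ([p] ++ [x]) = [p, x] from rfl, PySem.Chars.join_cons_cons,
      PySem.Chars.join_singleton, PySem.Chars.join_singleton]
  | cons q r ih =>
    intro x
    rw [show ((p :: q :: r) ++ [x]) = p :: ((q :: r) ++ [x]) from rfl]
    rw [show ((q :: r) ++ [x]) = q :: (r ++ [x]) from rfl]
    rw [PySem.Chars.join_cons_cons]
    rw [show (q :: (r ++ [x])) = ((q :: r) ++ [x]) from rfl]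
    rw [ih q x, PySem.Chars.join_cons_cons]
    simp [List.append_assoc]

theorem pvStrJoin_snoc (l : List String) (hl : l ≠ []) (x : String) :
    PySem.Str.join "_" (l ++ [x]) = PySem.Str.join "_" l ++ "_" ++ x := by
  apply String.toList_inj.mp
  rw [PySem.Str.toList_join]
  simp only [String.toList_append, PySem.Str.toList_join, List.map_append, List.map_cons,
    List.map_nil]
  cases l with
  | nil => exact absurd rfl hl
  | cons p r => exact pvCharsJoin_snoc _ _ _ _

theorem pvStrJoin_singleton (x : String) : PySem.Str.join "_" [x] = x := by
  apply String.toList_inj.mp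
  rw [PySem.Str.toList_join]
  simp [PySem.Chars.join_singleton]

-- ---- the best (longest) dictionary hit among prefixes of a segment ----
def pvBest (gram2id : List (String × Int)) (seg : List String) : Nat → Option (Int × Nat)
  | 0 => none
  | m + 1 =>
    match (PySem.Dict.mk gram2id).get? (PySem.Str.join "_" (seg.take (m + 1))) with
    | some v => some (v, m + 1)
    | none => pvBest gram2id seg m

theorem pvBest_bounds {g : List (String × Int)} {s : List String} :
    ∀ {m : Nat} {v : Int} {n : Nat}, pvBest g s m = some (v, n) → 1 ≤ n ∧ n ≤ m := by
  intro m
  induction m with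
  | zero => intro v n h; simp [pvBest] at h
  | succ m ih =>
    intro v n h
    simp only [pvBest] at h
    split at h
    · simp at h; omega
    · have := ih h; omega

-- A's descending first hit is pvBest
theorem pvTry_eq (words : List (Option String)) (g : List (String × Int)) (i : Nat)
    (seg : List String) (rest : List (Option String))
    (hdec : words.drop i = seg.map some ++ rest)
    (hr : rest = [] ∨ ∃ t, rest = none :: t) :
    ∀ fuel : Nat, fuel ≤ words.length - i →
    pvBTry words g (i : Int) fuel = pvBest g seg (min fuel seg.length) := by
  intro fuel
  induction fuel with
  | zero =>
    intro _
    simp [pvBTry, pvBest]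
  | succ m ih =>
    intro hle
    have hlen : (words.drop i).length = words.length - i := by simp
    have hlens : seg.length + rest.length = words.length - i := by
      rw [hdec] at hlen; simpa using hlen
    have hslice : PySem.List.slice words (some (i : Int)) (some ((i : Int) + ((m : Int) + 1)))
        = (words.drop i).take (m + 1) := by
      have hc : (i : Int) + ((m : Int) + 1) = (i : Int) + ((m + 1 : Nat) : Int) := by
        push_cast; ring
      rw [hc, PySem.List.slice_natCast_add]
    by_cases hcase : m + 1 ≤ seg.length
    · have htake : (words.drop i).take (m + 1) = (seg.take (m + 1)).map some := by
        rw [hdec, List.take_append_of_le_length (by simpa using hcase), List.map_take]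
      have hnone : ((seg.take (m + 1)).map some).contains (none : Option String) = false := by
        simp only [List.contains_eq_mem, decide_eq_false_iff_not]
        intro hmem
        simp only [List.mem_map] at hmem
        obtain ⟨x, -, hx⟩ := hmem
        exact Option.some_ne_none x hx
      have hmin1 : min (m + 1) seg.length = m + 1 := by omega
      have hmin2 : min m seg.length = m := by omega
      simp only [pvBTry, hslice, htake, hnone, Bool.false_eq_true, if_false]
      have hkey : ((seg.take (m + 1)).map some).map (fun o => o.getD "") = seg.take (m + 1) := by
        simp
      rw [hkey, hmin1]
      simp only [pvBest]
      cases hq : (PySem.Dict.mk g).get? (PySem.Str.join "_" (seg.take (m + 1))) with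
      | some v => rfl
      | none => rw [ih (by omega), hmin2]
    · rcases hr with rfl | ⟨t, rfl⟩
      · exfalso
        simp at hlens
        omega
      · have hcont : ((words.drop i).take (m + 1)).contains (none : Option String) = true := by
          rw [hdec]
          have hsplit : m + 1 = (seg.map some).length + (m + 1 - seg.length) := by
            simp; omega
          rw [hsplit, List.take_append]
          rw [show (List.map some seg).length + (m + 1 - seg.length) - (List.map some seg).length
              = m + 1 - seg.length by omega]
          have hpos : 1 ≤ m + 1 - seg.length := by omega
          have : (none : Option String) ∈ (none :: t).take (m + 1 - seg.length) := by
            cases hk : m + 1 - seg.length with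
            | zero => omega
            | succ k => simp [List.take_succ_cons]
          simp only [List.contains_eq_mem, decide_eq_true_eq]
          exact List.mem_append_right _ this
        have hmin1 : min (m + 1) seg.length = seg.length := by omega
        have hmin2 : min m seg.length = seg.length := by omega
        simp only [pvBTry, hslice, hcont, if_true]
        rw [ih (by omega), hmin1, hmin2]

-- B's ascending last hit is pvBest too
theorem pvFold_eq (g : List (String × Int)) (seg : List String) (i : Nat)
    (hi : i < seg.length) :
    ∀ m : Nat, m ≤ seg.length - i →
    ((PySem.List.pyRange 1 ((m : Int) + 1) 1).foldl (pvBStep seg g (i : Int)) ("", none))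
    = ((if m = 0 then "" else PySem.Str.join "_" ((seg.drop i).take m)),
       (pvBest g (seg.drop i) m).map (fun p => ((p.2 : Int), p.1))) := by
  intro m
  induction m with
  | zero =>
    intro _
    have h0 : PySem.List.pyRange 1 (((0 : Nat) : Int) + 1) 1 = [] := by
      rw [show ((0 : Nat) : Int) + 1 = 1 by norm_num]
      exact PySem.List.pyRange_one_eq_nil (by omega)
    rw [h0]
    simp [pvBest]
  | succ m ih =>
    intro hm
    have hidx : i + m < seg.length := by omega
    have hrange : PySem.List.pyRange 1 (((m + 1 : Nat) : Int) + 1) 1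
        = PySem.List.pyRange 1 ((m : Int) + 1) 1 ++ [(m : Int) + 1] := by
      rw [show ((m + 1 : Nat) : Int) + 1 = ((m : Int) + 1) + 1 by push_cast; ring]
      exact PySem.List.pyRange_one_succ_right (by omega)
    rw [hrange, List.foldl_append, ih (by omega)]
    simp only [List.foldl_cons, List.foldl_nil, pvBStep]
    have hgetm : PySem.List.pyGetD seg ((i : Int) + ((m : Int) + 1) - 1) "" = seg[i + m] := by
      rw [show (i : Int) + ((m : Int) + 1) - 1 = ((i + m : Nat) : Int) by push_cast; ring,
        PySem.List.pyGetD_natCast, List.getD_eq_getElem seg "" hidx]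
    have htake : (seg.drop i).take (m + 1) = (seg.drop i).take m ++ [seg[i + m]] := by
      rw [List.take_add_one]
      congr 1
      rw [List.getElem?_drop, List.getElem?_eq_getElem hidx]
      rfl
    have hacc : (if ((m : Int) + 1) = 1 then PySem.List.pyGetD seg (i : Int) ""
        else (if m = 0 then "" else PySem.Str.join "_" ((seg.drop i).take m)) ++ "_" ++
          PySem.List.pyGetD seg ((i : Int) + ((m : Int) + 1) - 1) "")
        = PySem.Str.join "_" ((seg.drop i).take (m + 1)) := by
      by_cases hm0 : m = 0
      · subst hm0
        rw [if_pos (by norm_num), htake, PySem.List.pyGetD_natCast,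
          List.getD_eq_getElem seg "" (by omega)]
        simp only [List.take_zero, List.nil_append]
        rw [pvStrJoin_singleton]
        simp
      · rw [if_neg (by omega), if_neg hm0, hgetm, htake,
          pvStrJoin_snoc _ ?_ _]
        intro hnil
        have := congrArg List.length hnil
        simp at this
        omega
    rw [hacc]
    simp only [pvBest]
    cases hq : (PySem.Dict.mk g).get? (PySem.Str.join "_" ((seg.drop i).take (m + 1))) with
    | some v =>
      refine Prod.ext (by simp) ?_
      simp only [Option.map_some]
      refine congrArg _ (Prod.ext ?_ rfl)
      push_cast
      ring
    | none =>
      refine Prod.ext (by simp) rfl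

-- unfolding of pvBSeg through pvBest
theorem pvBSeg_eq (g : List (String × Int)) (mpl : Int) (seg : List String) (i : Nat)
    (hi : i < seg.length) :
    pvBSeg g mpl seg i
    = match pvBest g (seg.drop i) (min mpl ((seg.length : Int) - (i : Int))).toNat with
      | some (v, n) => v :: pvBSeg g mpl seg (i + n)
      | none => pvBSeg g mpl seg (i + 1) := by
  have hfold : ((PySem.List.pyRange 1 (min mpl ((seg.length : Int) - (i : Int)) + 1) 1).foldl
      (pvBStep seg g (i : Int)) ("", none)).2
    = (pvBest g (seg.drop i) (min mpl ((seg.length : Int) - (i : Int))).toNat).map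
        (fun p => ((p.2 : Int), p.1)) := by
    by_cases hL : min mpl ((seg.length : Int) - (i : Int)) ≤ 0
    · rw [PySem.List.pyRange_one_eq_nil (by omega)]
      rw [show (min mpl ((seg.length : Int) - (i : Int))).toNat = 0 by omega]
      simp [pvBest]
    · have hM : (((min mpl ((seg.length : Int) - (i : Int))).toNat : Nat) : Int)
          = min mpl ((seg.length : Int) - (i : Int)) := by omega
      have hfe := pvFold_eq g seg i hi (min mpl ((seg.length : Int) - (i : Int))).toNat (by omega)
      rw [hM] at hfe
      rw [hfe]
  rw [pvBSeg, dif_pos hi]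
  cases hbest : pvBest g (seg.drop i) (min mpl ((seg.length : Int) - (i : Int))).toNat with
  | none =>
    split
    · rename_i kv hm
      rw [hfold, hbest] at hm
      exact absurd hm (by simp)
    · rfl
  | some p =>
    obtain ⟨v, n⟩ := p
    split
    · rename_i kv hm
      rw [hfold, hbest] at hm
      simp only [Option.map_some, Option.some_inj] at hm
      rw [← hm]
      simp
    · rename_i hm
      rw [hfold, hbest] at hm
      exact absurd hm (by simp)

theorem pvBSeg_nil (g : List (String × Int)) (mpl : Int) : pvBSeg g mpl [] 0 = [] := by
  rw [pvBSeg]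
  simp

theorem pvBSeg_shift (g : List (String × Int)) (mpl : Int) :
    ∀ (fuel : Nat) (seg : List String) (i : Nat), seg.length - i ≤ fuel →
    pvBSeg g mpl seg i = pvBSeg g mpl (seg.drop i) 0 := by
  intro fuel
  induction fuel with
  | zero =>
    intro seg i h
    rw [pvBSeg, dif_neg (by omega), pvBSeg, dif_neg (by simp; omega)]
  | succ f ih =>
    intro seg i h
    by_cases hi : i < seg.length
    · have hi0 : 0 < (seg.drop i).length := by simp; omega
      rw [pvBSeg_eq g mpl seg i hi, pvBSeg_eq g mpl (seg.drop i) 0 hi0]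
      have hal : min mpl (((seg.drop i).length : Int) - ((0 : Nat) : Int))
          = min mpl ((seg.length : Int) - (i : Int)) := by simp; omega
      rw [List.drop_zero, hal]
      cases hbest : pvBest g (seg.drop i) (min mpl ((seg.length : Int) - (i : Int))).toNat with
      | none =>
        show pvBSeg g mpl seg (i + 1) = pvBSeg g mpl (List.drop i seg) (0 + 1)
        rw [ih seg (i + 1) (by omega), ih (seg.drop i) (0 + 1) (by simp; omega),
          List.drop_drop]
      | some p =>
        obtain ⟨v, n⟩ := p
        have hn := pvBest_bounds hbest
        have hnle : n ≤ seg.length - i := by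
          have : ((min mpl ((seg.length : Int) - (i : Int))).toNat : Int)
              ≤ (seg.length : Int) - (i : Int) := by omega
          omega
        show v :: pvBSeg g mpl seg (i + n) = v :: pvBSeg g mpl (List.drop i seg) (0 + n)
        rw [ih seg (i + n) (by omega), ih (seg.drop i) (0 + n) (by simp; omega),
          List.drop_drop, show i + (0 + n) = i + n by omega]
    · rw [pvBSeg, dif_neg hi, pvBSeg, dif_neg (by simp; omega)]

-- ---- leading None-free run of a suffix ----
def pvRun : List (Option String) → List String
  | some w :: t => w :: pvRun t
  | _ => []

def pvRunRest : List (Option String) → List (Option String)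
  | some _ :: t => pvRunRest t
  | ws => ws

theorem pvRun_spec : ∀ ws : List (Option String), ws = (pvRun ws).map some ++ pvRunRest ws := by
  intro ws
  induction ws with
  | nil => rfl
  | cons w t ih =>
    cases w with
    | none => rfl
    | some x => simpa [pvRun, pvRunRest] using ih

theorem pvRunRest_shape : ∀ ws : List (Option String),
    pvRunRest ws = [] ∨ ∃ t, pvRunRest ws = none :: t := by
  intro ws
  induction ws with
  | nil => left; rfl
  | cons w t ih =>
    cases w with
    | none => right; exact ⟨t, rfl⟩
    | some x => simpa [pvRunRest] using ih

theorem pvRunFlat (g : List (String × Int)) (mpl : Int) (s : List String)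
    (rest : List (Option String)) (hr : rest = [] ∨ ∃ t, rest = none :: t) :
    (pvSegsFrom [] (s.map some ++ rest)).flatMap (fun x => pvBSeg g mpl x 0)
    = pvBSeg g mpl s 0 ++ (pvSegsFrom [] rest).flatMap (fun x => pvBSeg g mpl x 0) := by
  rw [pvSegsFrom_run]
  simp only [List.nil_append]
  rcases hr with rfl | ⟨t, rfl⟩
  · by_cases hs : s = []
    · subst hs; simp [pvSegsFrom, pvBSeg_nil]
    · simp [pvSegsFrom, hs]
  · by_cases hs : s = []
    · subst hs; simp [pvSegsFrom, pvBSeg_nil]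
    · simp [pvSegsFrom, hs]

-- ---- the main bridge: pvBGo equals B's segment processing ----
theorem pvMain2 (words : List (Option String)) (g : List (String × Int)) (mpl : Int) :
    ∀ (fuel i : Nat), words.length - i ≤ fuel →
    pvBGo words g mpl i
    = (pvSegsFrom [] (words.drop i)).flatMap (fun s => pvBSeg g mpl s 0) := by
  intro fuel
  induction fuel with
  | zero =>
    intro i h
    rw [pvBGo, dif_neg (by omega), List.drop_eq_nil_of_le (by omega)]
    simp [pvSegsFrom]
  | succ f ih =>
    intro i h
    by_cases hi : i < words.length
    · have hcons : words.drop i = words[i] :: words.drop (i + 1) :=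
        List.drop_eq_getElem_cons hi
      cases hw : words[i] with
      | none =>
        rw [pvBGo, dif_pos hi, if_pos hw, hcons, hw]
        simp only [pvSegsFrom]
        exact ih (i + 1) (by omega)
      | some w =>
        have hne : ¬ words[i] = none := by simp [hw]
        have hdec := pvRun_spec (words.drop i)
        have hshape := pvRunRest_shape (words.drop i)
        have hsegne : pvRun (words.drop i) ≠ [] := by
          rw [hcons, hw]
          simp [pvRun]
        have hlensum : (pvRun (words.drop i)).length + (pvRunRest (words.drop i)).length
            = words.length - i := by
          have := congrArg List.length hdec
          simp at this
          omega
        have hr1 : 1 ≤ (pvRun (words.drop i)).length := by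
          cases hx : pvRun (words.drop i) with
          | nil => exact absurd hx hsegne
          | cons a b => simp
        have htry := pvTry_eq words g i (pvRun (words.drop i)) (pvRunRest (words.drop i))
          hdec hshape (min mpl ((words.length : Int) - (i : Int))).toNat (by omega)
        have hminEq : min (min mpl ((words.length : Int) - (i : Int))).toNat
            (pvRun (words.drop i)).length
            = (min mpl (((pvRun (words.drop i)).length : Int))).toNat := by omega
        rw [hminEq] at htry
        -- right-hand side
        conv_rhs => rw [hdec]
        rw [pvRunFlat g mpl _ _ hshape,
          pvBSeg_eq g mpl (pvRun (words.drop i)) 0 (by omega),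
          List.drop_zero]
        rw [show ((pvRun (words.drop i)).length : Int) - ((0 : Nat) : Int)
            = ((pvRun (words.drop i)).length : Int) by push_cast; ring]
        -- left-hand side
        rw [pvBGo, dif_pos hi, if_neg hne]
        cases hbest : pvBest g (pvRun (words.drop i))
            (min mpl (((pvRun (words.drop i)).length : Int))).toNat with
        | none =>
          split
          · rename_i v' n' hm
            rw [htry, hbest] at hm
            exact absurd hm (by simp)
          · show pvBGo words g mpl (i + 1)
              = pvBSeg g mpl (pvRun (words.drop i)) (0 + 1) ++ _
            rw [pvBSeg_shift g mpl ((pvRun (words.drop i)).length) (pvRun (words.drop i))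
              (0 + 1) (by omega)]
            rw [ih (i + 1) (by omega)]
            have hd1 : words.drop (i + 1)
                = ((pvRun (words.drop i)).drop 1).map some ++ pvRunRest (words.drop i) := by
              conv_lhs => rw [← List.drop_drop, hdec]
              rw [List.drop_append_of_le_length (by simp; omega), ← List.map_drop]
            rw [hd1, pvRunFlat g mpl _ _ hshape]
        | some p =>
          obtain ⟨v, n⟩ := p
          have hn := pvBest_bounds hbest
          have hnler : n ≤ (pvRun (words.drop i)).length := by
            have : ((min mpl (((pvRun (words.drop i)).length : Int))).toNat : Int)
                ≤ ((pvRun (words.drop i)).length : Int) := by omega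
            omega
          split
          · rename_i v' n' hm
            rw [htry, hbest] at hm
            obtain ⟨rfl, rfl⟩ : v = v' ∧ n = n' := by simpa using hm
            show v :: pvBGo words g mpl (i + n)
              = (v :: pvBSeg g mpl (pvRun (words.drop i)) (0 + n)) ++ _
            rw [pvBSeg_shift g mpl ((pvRun (words.drop i)).length) (pvRun (words.drop i))
              (0 + n) (by omega)]
            rw [ih (i + n) (by omega)]
            have hd1 : words.drop (i + n)
                = ((pvRun (words.drop i)).drop n).map some ++ pvRunRest (words.drop i) := by
              conv_lhs => rw [← List.drop_drop, hdec]
              rw [List.drop_append_of_le_length (by simp; omega), ← List.map_drop]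
            rw [hd1, pvRunFlat g mpl _ _ hshape]
            rw [show (0 + n : Nat) = n by omega]
            simp
          · rename_i hm
            rw [htry, hbest] at hm
            exact absurd hm (by simp)
    · rw [pvBGo, dif_neg hi, List.drop_eq_nil_of_le (by omega)]
      simp [pvSegsFrom]

-- ===== VERDICT (by name: the statement is the Claim_ definition above) =====
theorem apply_phraser_spec : Claim_equal_apply_phraser := by
  intro words gram2id mpl _
  unfold Spec_apply_phraser apply_phraser apply_phraser_alt
  have hA := pvMain words gram2id mpl words.length 0 [] (by omega)
  have h2 := pvMain2 words gram2id mpl words.length 0 (by omega)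
  rw [PySem.List.foldl_append_eq_flatMap, pvSegs_eq]
  simp only [Nat.cast_zero] at hA
  rw [hA, h2]
  simp
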